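-- pv_equiv track=rewrite | github.com/ToobaSh/French-Health-Chatbot | src/rag_pipeline.py | _merge_snippets
-- ===== SOURCE A (Python) =====
-- from typing import List, Dict, Any
--
-- def _merge_snippets(snippets: List[str], max_chars: int = 900) -> str:
--     """
--     Fusionne plusieurs petits résumés en un bloc cohérent,
--     sans dépasser une certaine longueur.
--     """
--     merged: List[str] = []
--     current_len = 0
--
--     for s in snippets:
--         s = s.strip()
--         if not s:
--             continue
--         if current_len + len(s) + 1 > max_chars:
--             break
--         merged.append(s)
--         current_len += len(s) + 1
--
--     merged_text = " ".join(merged).strip()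
--     return merged_text
-- ===== SOURCE B (Python) =====
-- def _merge_snippets(snippets, max_chars=900):
--     cleaned = [t for t in (s.strip() for s in snippets) if t]
--     cums = []
--     total = 0
--     for s in cleaned:
--         total += len(s) + 1
--         cums.append(total)
--     # cums is strictly increasing, so filtering by the budget keeps exactly
--     # the maximal prefix that fits -- no break/accumulator loop needed.
--     taken = [s for s, c in zip(cleaned, cums) if c <= max_chars]
--     return " ".join(taken).strip()
-- ===== Notes on version B (the rewrite author's own statement) =====
-- stated objective: alternative
-- what changed: Replaces the single mutable-accumulator loop with break/continue by a pipeline: filter-and-strip the snippets, build a prefix-sum table of cumulative len+1, and select the fitting prefix by filtering the (snippet, cumulative) pairs against the budget (valid because the prefix sums are strictly increasing), then join.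
import Mathlib
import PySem

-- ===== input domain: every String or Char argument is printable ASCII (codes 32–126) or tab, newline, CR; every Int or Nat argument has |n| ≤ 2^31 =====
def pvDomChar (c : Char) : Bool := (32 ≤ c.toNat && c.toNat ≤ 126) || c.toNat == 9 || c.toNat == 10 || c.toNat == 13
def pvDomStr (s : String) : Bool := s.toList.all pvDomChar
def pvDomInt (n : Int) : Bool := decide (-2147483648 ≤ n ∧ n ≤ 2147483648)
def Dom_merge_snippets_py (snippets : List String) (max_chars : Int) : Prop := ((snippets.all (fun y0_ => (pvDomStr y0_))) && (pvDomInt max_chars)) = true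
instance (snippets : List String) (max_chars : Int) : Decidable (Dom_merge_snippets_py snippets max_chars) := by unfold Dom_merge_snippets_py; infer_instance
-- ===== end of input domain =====

-- B replaces A's break/continue accumulator loop by a filter + prefix-sum table + prefix selection pipeline (alternative decomposition, same cost).

-- ===== PORT A =====
-- the for-loop of A: state = (merged, current_len); 'continue' on blank, 'break' on overflow
def aLoop (max_chars : Int) : List String → List String → Int → List String
  | [], merged, _ => merged
  | s :: rest, merged, current_len =>
    let t := PySem.Str.strip s
    if t = "" then aLoop max_chars rest merged current_len
    else if current_len + PySem.Str.len t + 1 > max_chars then merged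
    else aLoop max_chars rest (merged ++ [t]) (current_len + PySem.Str.len t + 1)

def merge_snippets_py (snippets : List String) (max_chars : Int) : String :=
  PySem.Str.strip (PySem.Str.join " " (aLoop max_chars snippets [] 0))

-- ===== PORT B =====
-- cums-building loop of B: running total, append total after each cleaned snippet
def bCums : List String → Int → List Int
  | [], _ => []
  | s :: rest, total => (total + PySem.Str.len s + 1) :: bCums rest (total + PySem.Str.len s + 1)

def merge_snippets_py_alt (snippets : List String) (max_chars : Int) : String :=
  let cleaned := snippets.filterMap (fun s => let t := PySem.Str.strip s; if t = "" then none else some t)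
  let cums := bCums cleaned 0
  let taken := ((cleaned.zip cums).filter (fun p => decide (p.2 ≤ max_chars))).map Prod.fst
  PySem.Str.strip (PySem.Str.join " " taken)

-- ===== PRECONDITION & SPEC =====
def Spec_merge_snippets_py (snippets : List String) (max_chars : Int) (out : String) : Prop := out = merge_snippets_py_alt snippets max_chars
instance (snippets : List String) (max_chars : Int) (out : String) : Decidable (Spec_merge_snippets_py snippets max_chars out) := by unfold Spec_merge_snippets_py; infer_instance

-- ===== CLAIM (what is proved, stated in full; the proofs are below) =====
def Claim_equal_merge_snippets_py : Prop := ∀ (snippets : List String) (max_chars : Int), Dom_merge_snippets_py snippets max_chars → Spec_merge_snippets_py snippets max_chars (merge_snippets_py snippets max_chars)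

-- ===== LEMMAS AND PROOFS =====

-- greedy prefix selection: intermediate characterisation shared by both sides
def sel (max_chars : Int) : List String → Int → List String
  | [], _ => []
  | t :: rest, cur =>
    if cur + PySem.Str.len t + 1 > max_chars then []
    else t :: sel max_chars rest (cur + PySem.Str.len t + 1)

lemma aLoop_eq_sel (max_chars : Int) (l : List String) :
    ∀ merged cur, aLoop max_chars l merged cur =
      merged ++ sel max_chars (l.filterMap (fun s => let t := PySem.Str.strip s; if t = "" then none else some t)) cur := by
  induction l with
  | nil => intro merged cur; simp [aLoop, sel]
  | cons s rest ih =>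
    intro merged cur
    by_cases h : PySem.Str.strip s = ""
    · simp [aLoop, h, ih]
    · simp [aLoop, h, ih, sel]
      split <;> simp

lemma bCums_lt (l : List String) : ∀ cur x, x ∈ bCums l cur → cur < x := by
  induction l with
  | nil => intro cur x hx; simp [bCums] at hx
  | cons t rest ih =>
    intro cur x hx
    simp only [bCums, List.mem_cons] at hx
    rcases hx with h | h
    · have : (0:Int) ≤ (t.length : Int) := by positivity
      simp [PySem.Str.len_eq] at h; omega
    · have := ih _ _ h
      have : (0:Int) ≤ (t.length : Int) := by positivity
      simp [PySem.Str.len_eq] at *; omega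

lemma sel_eq_filter (max_chars : Int) (l : List String) :
    ∀ cur, sel max_chars l cur =
      ((l.zip (bCums l cur)).filter (fun p => decide (p.2 ≤ max_chars))).map Prod.fst := by
  induction l with
  | nil => intro cur; simp [sel, bCums]
  | cons t rest ih =>
    intro cur
    by_cases h : max_chars ≤ cur + (t.length : Int)
    · have h1 : ¬ (cur + (t.length : Int) < max_chars) := by omega
      simp [sel, bCums, h1, PySem.Str.len_eq, h]
      intro a b hb
      have hmem := (List.of_mem_zip hb).2
      have := bCums_lt rest _ _ hmem
      omega
    · have h1 : cur + (t.length : Int) < max_chars := by omega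
      simp [sel, bCums, h1, PySem.Str.len_eq, h, ih]

-- ===== VERDICT (by name: the statement is the Claim_ definition above) =====
theorem merge_snippets_py_spec : Claim_equal_merge_snippets_py := by
  intro snippets max_chars _
  unfold Spec_merge_snippets_py merge_snippets_py merge_snippets_py_alt
  rw [aLoop_eq_sel, sel_eq_filter]
  simp
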